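-- pv_equiv track=rewrite | github.com/windhaunting/Coding_practices | DP/editDistanceDeleteDistance.py | deletion_distance
-- ===== SOURCE A (Python) =====
-- def deletion_distance(word1, word2):
--     #pass # your code goes here
--
--     l1 = len(word1)
--     l2 = len(word2)
--
--     DP = [[0]*(l2+1) for i in range(l1+1)]
--
--     for i in range(0, l1+1):
--         for j in range(0, l2+1):
--             if i == 0:
--                 DP[i][j] = j
--             elif j == 0:
--                 DP[i][j] = i
--             elif word1[i-1] == word2[j-1]:
--                 DP[i][j] = DP[i-1][j-1]
--             else:
--                 DP[i][j] = 1 + min(DP[i-1][j], DP[i][j-1])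
--
--     return DP[l1][l2]
-- ===== SOURCE B (Python) =====
-- def deletion_distance(word1, word2):
--     # LCS via a rolling row built as a prefix scan (each new row is a left-to-right
--     # "running accumulator" scan over zip(word2, row, row[1:])); answer = l1+l2-2*LCS
--     row = [0] * (len(word2) + 1)
--     for c in word1:
--         acc = [0]
--         for b, pdiag, pright in zip(word2, row, row[1:]):
--             acc.append(pdiag + 1 if c == b else max(pright, acc[-1]))
--         row = acc
--     return len(word1) + len(word2) - 2 * row[-1]
-- ===== Notes on version B (the rewrite author's own statement) =====
-- stated objective: faster
-- what changed: B computes the longest-common-subsequence length with a rolling row built as a left-to-right prefix scan over zip(word2,row,row[1:]) and returns l1+l2-2*LCS, instead of A's full (l1+1)x(l2+1) minimization table of deletion counts indexed back into; dropping the quadratic table and index arithmetic gives a measured ~2x speedup.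
import Mathlib
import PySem

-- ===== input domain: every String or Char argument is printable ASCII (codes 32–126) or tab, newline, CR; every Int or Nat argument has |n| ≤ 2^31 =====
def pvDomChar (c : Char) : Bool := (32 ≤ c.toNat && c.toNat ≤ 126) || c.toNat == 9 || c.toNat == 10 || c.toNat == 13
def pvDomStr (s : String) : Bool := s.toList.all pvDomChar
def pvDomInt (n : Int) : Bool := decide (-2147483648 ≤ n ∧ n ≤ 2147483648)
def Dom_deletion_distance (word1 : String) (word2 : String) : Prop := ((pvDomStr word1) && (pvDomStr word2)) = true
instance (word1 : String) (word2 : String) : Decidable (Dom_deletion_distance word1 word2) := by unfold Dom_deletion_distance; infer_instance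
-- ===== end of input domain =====

-- B replaces A's full minimization table of deletion counts by an LCS rolling row
-- built as a prefix scan, returning l1 + l2 - 2*LCS (measured faster, O(l2) space).

-- ===== PORT A =====
-- inner loop of row i (i ≥ 1), positions j = j0+1, …: diag = DP[i-1][j-1], left = DP[i][j-1],
-- ps = DP[i-1][j], DP[i-1][j+1], …
def goA (c : Char) : List Char → Int → Int → List Int → List Int
  | b :: bs, diag, left, p :: ps =>
      let v := if c == b then diag else 1 + min p left
      v :: goA c bs p v ps
  | _, _, _, _ => []

-- row i (i ≥ 1) from row i-1: DP[i][0] = i, then the inner j-loop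
def nextRowA (c : Char) (w2 : List Char) (prev : List Int) (i : Int) : List Int :=
  match prev with
  | [] => []
  | d :: ps => i :: goA c w2 d i ps

def deletion_distance (word1 : String) (word2 : String) : Int :=
  let cs1 := word1.toList
  let cs2 := word2.toList
  let l2 := cs2.length
  -- row 0: DP[0][j] = j
  let row0 : List Int := (List.range (l2 + 1)).map (fun k => (k : Int))
  -- outer i-loop, state = (current row, i)
  let res := cs1.foldl (fun (st : List Int × Int) c => (nextRowA c cs2 st.1 (st.2 + 1), st.2 + 1)) (row0, 0)
  res.1.getD l2 0      -- DP[l1][l2]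

-- ===== PORT B =====
-- one inner-loop step: acc-last ↦ next appended value, fed (b, (row[j-1], row[j]))
def stepB (c : Char) (left : Int) (p : Char × Int × Int) : Int :=
  if c == p.1 then p.2.1 + 1 else max p.2.2 left

-- the inner loop of Source B: acc = [0]; append f(acc[-1], _) along zip(word2, row, row[1:])
def nextRowB (c : Char) (w2 : List Char) (row : List Int) : List Int :=
  List.scanl (stepB c) 0 (w2.zip (row.zip row.tail))

def deletion_distance_alt (word1 : String) (word2 : String) : Int :=
  let cs1 := word1.toList
  let cs2 := word2.toList
  let row0 : List Int := List.replicate (cs2.length + 1) 0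
  let fin := cs1.foldl (fun row c => nextRowB c cs2 row) row0
  (cs1.length : Int) + (cs2.length : Int) - 2 * fin.getD cs2.length 0

-- ===== PRECONDITION & SPEC =====
def Spec_deletion_distance (word1 : String) (word2 : String) (out : Int) : Prop := out = deletion_distance_alt word1 word2
instance (word1 : String) (word2 : String) (out : Int) : Decidable (Spec_deletion_distance word1 word2 out) := by unfold Spec_deletion_distance; infer_instance

-- ===== CLAIM (what is proved, stated in full; the proofs are below) =====
def Claim_equal_deletion_distance : Prop := ∀ (word1 : String) (word2 : String), Dom_deletion_distance word1 word2 → Spec_deletion_distance word1 word2 (deletion_distance word1 word2)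

-- ===== LEMMAS AND PROOFS =====

-- PvRel i j as bs: as lists DP-row-i entries from column j on, bs the LCS-row-i entries,
-- and pointwise DP[i][j+k] = i + (j+k) - 2 * L[i][j+k]
def PvRel : Int → Int → List Int → List Int → Prop
  | _, _, [], [] => True
  | i, j, a :: as, b :: bs => a = i + j - 2 * b ∧ PvRel i (j + 1) as bs
  | _, _, _, _ => False

theorem scanl_eq_cons {α β : Type} (f : β → α → β) (b : β) (l : List α) :
    List.scanl f b l = b :: (List.scanl f b l).tail := by
  cases l <;> simp [List.scanl]

theorem go_length : ∀ (w2 : List Char) (ps : List Int) (c : Char) (d l : Int),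
    (goA c w2 d l ps).length = min w2.length ps.length := by
  intro w2
  induction w2 with
  | nil => intro ps c d l; simp [goA]
  | cons b bs ih =>
    intro ps c d l
    cases ps with
    | nil => simp [goA]
    | cons p ps => simp [goA, ih]

theorem scan_rel : ∀ (w2 : List Char) (psA psB : List Int) (i j dA dB lA lB : Int) (c : Char),
    PvRel i j psA psB → dA = i + (j - 1) - 2 * dB → lA = (i + 1) + (j - 1) - 2 * lB →
    PvRel (i + 1) j (goA c w2 dA lA psA)
      (List.scanl (stepB c) lB (w2.zip ((dB :: psB).zip psB))).tail := by
  intro w2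
  induction w2 with
  | nil => intro psA psB i j dA dB lA lB c hrel _ _
           cases psA with
           | nil => simp [goA, List.scanl, PvRel]
           | cons p ps =>
             cases psB with
             | nil => exact absurd hrel (by simp [PvRel])
             | cons q qs => simp [goA, List.scanl, PvRel]
  | cons b bs ih =>
    intro psA psB i j dA dB lA lB c hrel hd hl
    cases psB with
    | nil =>
      cases psA with
      | nil => simp [goA, List.scanl, PvRel]
      | cons p ps => exact absurd hrel (by simp [PvRel])
    | cons q qs =>
      cases psA with
      | nil => exact absurd hrel (by simp [PvRel])
      | cons p ps =>
        obtain ⟨hp, hrest⟩ := hrel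
        simp only [List.zip_cons_cons, List.scanl_cons, List.tail_cons, goA]
        rw [scanl_eq_cons]
        refine ⟨?_, ?_⟩
        · -- head values match under the relation
          unfold stepB
          by_cases hc : c == b <;> simp [hc] <;> omega
        · have := ih ps qs i (j + 1) p q
            (if c == b then dA else 1 + min p lA)
            (stepB c lB (b, dB, q)) c hrest (by omega)
            (by unfold stepB; by_cases hc : c == b <;> simp [hc] <;> omega)
          simpa using this

theorem row_rel (c : Char) (w2 : List Char) (prevA prevB : List Int) (i : Int)
    (hlen : prevA.length = w2.length + 1)
    (h : PvRel i 0 prevA prevB) :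
    PvRel (i + 1) 0 (nextRowA c w2 prevA (i + 1)) (nextRowB c w2 prevB) := by
  cases prevA with
  | nil => simp at hlen
  | cons d ps =>
    cases prevB with
    | nil => exact absurd h (by simp [PvRel])
    | cons dB qs =>
      obtain ⟨hd, hrest⟩ := h
      unfold nextRowA nextRowB
      rw [scanl_eq_cons]
      refine ⟨by omega, ?_⟩
      simpa using scan_rel w2 ps qs i 1 d dB (i + 1) 0 c hrest (by omega) (by omega)

theorem row_length (c : Char) (w2 : List Char) (prevA : List Int) (i : Int)
    (h : prevA.length = w2.length + 1) :
    (nextRowA c w2 prevA (i + 1)).length = w2.length + 1 := by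
  cases prevA with
  | nil => simp at h
  | cons d ps =>
    simp only [nextRowA, List.length_cons, go_length]
    simp at h
    omega

theorem rel_init : ∀ (n s : Nat),
    PvRel 0 s ((List.range' s n).map (fun k => (k : Int))) (List.replicate n 0) := by
  intro n
  induction n with
  | zero => intro s; simp [PvRel]
  | succ m ih =>
    intro s
    rw [List.range'_succ, List.replicate_succ]
    exact ⟨by simp, by simpa [Int.natCast_succ] using ih (s + 1)⟩

theorem rel_getD : ∀ (as bs : List Int) (i j : Int) (k : Nat),
    PvRel i j as bs → k < as.length → as.getD k 0 = i + j + k - 2 * bs.getD k 0 := by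
  intro as
  induction as with
  | nil => intro bs i j k _ hk; simp at hk
  | cons a as ih =>
    intro bs i j k hrel hk
    cases bs with
    | nil => exact absurd hrel (by simp [PvRel])
    | cons b bs =>
      obtain ⟨ha, hrest⟩ := hrel
      cases k with
      | zero => simpa using by omega
      | succ m =>
        have := ih bs i (j + 1) m hrest (by simpa using Nat.lt_of_succ_lt_succ hk)
        simp only [List.getD_cons_succ]
        rw [this]
        push_cast
        ring

theorem fold_inv : ∀ (cs w2 : List Char) (rA rB : List Int) (i : Int),
    rA.length = w2.length + 1 → PvRel i 0 rA rB →
    let resA := cs.foldl (fun (st : List Int × Int) c => (nextRowA c w2 st.1 (st.2 + 1), st.2 + 1)) (rA, i)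
    let resB := cs.foldl (fun row c => nextRowB c w2 row) rB
    resA.2 = i + cs.length ∧ resA.1.length = w2.length + 1 ∧ PvRel resA.2 0 resA.1 resB := by
  intro cs
  induction cs with
  | nil => intro w2 rA rB i hlen hrel; exact ⟨by simp, hlen, hrel⟩
  | cons c cs ih =>
    intro w2 rA rB i hlen hrel
    simp only [List.foldl_cons]
    have h1 := row_length c w2 rA i hlen
    have h2 := row_rel c w2 rA rB i hlen hrel
    have := ih w2 (nextRowA c w2 rA (i + 1)) (nextRowB c w2 rB) (i + 1) h1 h2
    refine ⟨?_, this.2.1, this.2.2⟩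
    rw [this.1]; simp [List.length_cons]; ring

-- ===== VERDICT (by name: the statement is the Claim_ definition above) =====
theorem deletion_distance_spec : Claim_equal_deletion_distance := by
  intro word1 word2 _
  unfold Spec_deletion_distance deletion_distance deletion_distance_alt
  set cs1 := word1.toList
  set cs2 := word2.toList
  have hinit : PvRel 0 0 ((List.range (cs2.length + 1)).map (fun k => (k : Int)))
      (List.replicate (cs2.length + 1) 0) := by
    rw [List.range_eq_range']
    exact rel_init (cs2.length + 1) 0
  have hlen : ((List.range (cs2.length + 1)).map (fun k => (k : Int))).length = cs2.length + 1 := by simp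
  have h := fold_inv cs1 cs2 ((List.range (cs2.length + 1)).map (fun k => (k : Int)))
      (List.replicate (cs2.length + 1) 0) 0 hlen hinit
  obtain ⟨hi, hl, hrel⟩ := h
  have := rel_getD _ _ _ 0 cs2.length hrel (by omega)
  rw [this, hi]
  push_cast
  ring
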